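-- pv_equiv track=rewrite | github.com/vegito5ama/submission4kdl | main.py | min_time_for_meal
-- ===== SOURCE A (Python) =====
-- def min_time_for_meal(test_cases):
--     results = []
--
--     for case in test_cases:
--         N, K, categories, times = case
--         if len(set(categories)) < K:
--             results.append(-1)
--             continue
--
--         category_to_min_time = {}
--
--         for cat, time in zip(categories, times):
--             if cat in category_to_min_time:
--                 category_to_min_time[cat] = min(category_to_min_time[cat], time)
--             else:
--                 category_to_min_time[cat] = time
--
--         if len(category_to_min_time) < K:
--             results.append(-1)
--             continue
--
--         min_times = sorted(category_to_min_time.values())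
--         results.append(sum(min_times[:K]))
--
--     return results
-- ===== SOURCE B (Python) =====
-- def _case_result(K, categories, times):
--     pairs = list(zip(categories, times))
--     cats = list(dict.fromkeys(c for c, _ in pairs))
--     if len(cats) < K:
--         return -1
--     mins = sorted(min(t for c2, t in pairs if c2 == c) for c in cats)
--     return sum(mins[:K])
--
--
-- def min_time_for_meal(test_cases):
--     return [_case_result(K, categories, times)
--             for _, K, categories, times in test_cases]
-- ===== Notes on version B (the rewrite author's own statement) =====
-- stated objective: alternative
-- what changed: Replaces A's single-pass dict-of-running-minima (plus a separate set(categories) pre-check) with: dedup the zipped categories once, then compute each category's minimum by a direct scan of the pairs, with one distinct-count check; no dict is built.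
import Mathlib
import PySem

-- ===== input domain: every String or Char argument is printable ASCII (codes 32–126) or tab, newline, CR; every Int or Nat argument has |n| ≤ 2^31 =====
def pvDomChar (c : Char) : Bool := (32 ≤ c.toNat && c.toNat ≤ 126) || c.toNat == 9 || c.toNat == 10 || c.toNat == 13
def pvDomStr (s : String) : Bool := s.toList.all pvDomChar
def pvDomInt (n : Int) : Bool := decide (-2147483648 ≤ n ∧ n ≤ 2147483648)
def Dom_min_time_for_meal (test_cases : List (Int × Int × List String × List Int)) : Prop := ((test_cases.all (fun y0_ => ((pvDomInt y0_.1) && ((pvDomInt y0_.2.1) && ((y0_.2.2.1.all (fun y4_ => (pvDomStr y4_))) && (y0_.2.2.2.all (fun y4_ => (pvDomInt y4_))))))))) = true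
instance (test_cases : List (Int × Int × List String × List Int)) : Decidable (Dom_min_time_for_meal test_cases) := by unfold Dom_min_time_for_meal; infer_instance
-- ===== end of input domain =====

-- B replaces A's dict-of-running-minima (plus separate set(categories) pre-check) with dedup-then-per-category-min scans; alternative decomposition, not faster.


-- ===== PORT A =====
-- per-case body of A's loop (N is destructured by A but unused in the computation)
def pvAcase (K : Int) (categories : List String) (times : List Int) : Int :=
  if ((PySem.Set.ofList categories).length : Int) < K then -1
  else
    let d := (categories.zip times).foldl
      (fun d p =>
        match d.get? p.1 with
        | some v => d.insert p.1 (min v p.2)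
        | none => d.insert p.1 p.2) PySem.Dict.empty
    if ((PySem.Dict.size d : Int)) < K then -1
    else (PySem.List.slice (PySem.List.sorted (PySem.Dict.values d) (fun x => x) false) none (some K)).sum

def min_time_for_meal (test_cases : List (Int × Int × List String × List Int)) : List Int :=
  test_cases.foldl (fun results case => results ++ [pvAcase case.2.1 case.2.2.1 case.2.2.2]) []

-- ===== PORT B =====
-- per-category minimum: min(t for c2, t in pairs if c2 == c); for every c drawn from the
-- deduped categories the filtered list is nonempty, so the `none` branch is unreachable
def pvBmin (pairs : List (String × Int)) (c : String) : Int :=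
  match PySem.List.min? ((pairs.filter (fun p => p.1 == c)).map Prod.snd) (fun x => x) with
  | some m => m
  | none => 0

def pvBcase (K : Int) (categories : List String) (times : List Int) : Int :=
  let pairs := categories.zip times
  let cats := PySem.List.dedup (pairs.map Prod.fst)
  if (cats.length : Int) < K then -1
  else
    let mins := PySem.List.sorted (cats.map (pvBmin pairs)) (fun x => x) false
    (PySem.List.slice mins none (some K)).sum

def min_time_for_meal_alt (test_cases : List (Int × Int × List String × List Int)) : List Int :=
  test_cases.map (fun case => pvBcase case.2.1 case.2.2.1 case.2.2.2)

-- ===== PRECONDITION & SPEC =====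
def Spec_min_time_for_meal (test_cases : List (Int × Int × List String × List Int)) (out : List Int) : Prop := out = min_time_for_meal_alt test_cases
instance (test_cases : List (Int × Int × List String × List Int)) (out : List Int) : Decidable (Spec_min_time_for_meal test_cases out) := by unfold Spec_min_time_for_meal; infer_instance

-- ===== CLAIM (what is proved, stated in full; the proofs are below) =====
def Claim_equal_min_time_for_meal : Prop := ∀ (test_cases : List (Int × Int × List String × List Int)), Dom_min_time_for_meal test_cases → Spec_min_time_for_meal test_cases (min_time_for_meal test_cases)

-- ===== LEMMAS AND PROOFS =====

-- value of min over a list extended by one element, Option-valued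
lemma min?_snoc (xs : List Int) (t : Int) :
    PySem.List.min? (xs ++ [t]) (fun x => x)
    = some (match PySem.List.min? xs (fun x => x) with | some v => min v t | none => t) := by
  cases xs with
  | nil => simp [PySem.List.min?]
  | cons x l =>
    rw [List.cons_append, PySem.List.min?_id_cons, PySem.List.min?_id_cons]
    simp [List.foldl_append]

-- A's dict-loop body is an insert keyed by p.1 (uniform shape for the Dict fold lemmas)
lemma pvAstep_eq :
    (fun (d : PySem.Dict String Int) (p : String × Int) =>
      match d.get? p.1 with
      | some v => d.insert p.1 (min v p.2)
      | none => d.insert p.1 p.2)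
    = fun d p => d.insert p.1 (match d.get? p.1 with | some v => min v p.2 | none => p.2) := by
  funext d p
  cases d.get? p.1 <;> rfl

-- lookup in A's dict = Python's min over that category's times (as an Option)
lemma get?_build (P : List (String × Int)) (c : String) :
    (P.foldl (fun d p => d.insert p.1
        (match d.get? p.1 with | some v => min v p.2 | none => p.2))
      (PySem.Dict.empty : PySem.Dict String Int)).get? c
    = PySem.List.min? ((P.filter (fun p => p.1 == c)).map Prod.snd) (fun x => x) := by
  induction P using List.reverseRecOn with
  | nil => simp [PySem.Dict.get?_empty, PySem.List.min?]
  | append_singleton Q p ih =>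
    rw [List.foldl_append]
    simp only [List.foldl_cons, List.foldl_nil]
    rw [PySem.Dict.get?_insert, List.filter_append]
    by_cases hc : c = p.1
    · subst hc
      simp only [List.filter_cons, beq_self_eq_true, if_pos]
      simp only [List.filter_nil, List.map_append, List.map_cons, List.map_nil]
      rw [min?_snoc, ih]
    · rw [if_neg hc]
      have hb : (p.1 == c) = false := by simp [Ne.symm hc]
      simp [hb, ih]

-- A's dict keys are B's deduped categories, in the same (first-occurrence) order
lemma keys_build (P : List (String × Int)) :
    (P.foldl (fun d p => d.insert p.1
        (match d.get? p.1 with | some v => min v p.2 | none => p.2))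
      (PySem.Dict.empty : PySem.Dict String Int)).keys
    = PySem.List.dedup (P.map Prod.fst) := by
  have h := PySem.Dict.keys_foldl_insert_key P Prod.fst
      (fun d p => (match d.get? p.1 with | some v => min v p.2 | none => p.2))
      (PySem.Dict.empty : PySem.Dict String Int)
  simp only [PySem.Dict.keys_empty] at h
  rw [PySem.List.dedup_eq_ofList]
  exact h.trans rfl

lemma size_build (P : List (String × Int)) :
    PySem.Dict.size (P.foldl (fun d p => d.insert p.1
        (match d.get? p.1 with | some v => min v p.2 | none => p.2))
      (PySem.Dict.empty : PySem.Dict String Int))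
    = (PySem.List.dedup (P.map Prod.fst)).length := by
  rw [← keys_build P]
  simp [PySem.Dict.size, PySem.Dict.keys]

-- A's dict values = B's per-category minima over the deduped categories
lemma values_build (P : List (String × Int)) :
    PySem.Dict.values (P.foldl (fun d p => d.insert p.1
        (match d.get? p.1 with | some v => min v p.2 | none => p.2))
      (PySem.Dict.empty : PySem.Dict String Int))
    = (PySem.List.dedup (P.map Prod.fst)).map (pvBmin P) := by
  have hnodup : (P.foldl (fun d p => d.insert p.1
        (match d.get? p.1 with | some v => min v p.2 | none => p.2))
      (PySem.Dict.empty : PySem.Dict String Int)).keys.Nodup := by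
    rw [keys_build P, PySem.List.dedup_eq_ofList]
    exact PySem.Set.nodup_ofList (xs := P.map Prod.fst)
  rw [PySem.Dict.values_eq_map_keys _ hnodup 0, keys_build P]
  apply List.map_congr_left
  intro c hc
  have hmem : c ∈ P.map Prod.fst := by
    rw [PySem.List.dedup_eq_ofList, PySem.Set.mem_ofList] at hc; exact hc
  obtain ⟨p, hp, rfl⟩ := List.mem_map.mp hmem
  have hne : ((P.filter (fun q => q.1 == p.1)).map Prod.snd) ≠ [] := by
    have hmemf : p ∈ P.filter (fun q => q.1 == p.1) := by
      rw [List.mem_filter]; exact ⟨hp, by simp⟩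
    intro hnil
    exact absurd (List.mem_map_of_mem (f := Prod.snd) hmemf) (by simp [hnil])
  rcases hmin : PySem.List.min? ((P.filter (fun q => q.1 == p.1)).map Prod.snd) (fun x => x) with _ | m
  · exact absurd ((PySem.List.min?_eq_none_iff _ _).mp hmin) hne
  · rw [PySem.Dict.getD_eq_get?_getD, get?_build, hmin, pvBmin, hmin]; rfl

-- distinct categories of the (possibly truncated) zip are at most len(set(categories))
lemma dedup_zip_len_le (cs : List String) (ts : List Int) :
    (PySem.List.dedup ((cs.zip ts).map Prod.fst)).length ≤ (PySem.Set.ofList cs).length := by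
  rw [PySem.List.dedup_eq_ofList]
  have h1 := PySem.Set.nodup_ofList (xs := (cs.zip ts).map Prod.fst)
  have h2 := PySem.Set.nodup_ofList (xs := cs)
  rw [← List.toFinset_card_of_nodup h1, ← List.toFinset_card_of_nodup h2]
  apply Finset.card_le_card
  intro x hx
  rw [List.mem_toFinset, PySem.Set.mem_ofList] at *
  obtain ⟨p, hp, rfl⟩ := List.mem_map.mp hx
  exact (List.of_mem_zip hp).1

lemma pvcase_eq (K : Int) (cs : List String) (ts : List Int) :
    pvAcase K cs ts = pvBcase K cs ts := by
  simp only [pvAcase, pvBcase, pvAstep_eq, size_build, values_build]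
  have hle : (PySem.List.dedup ((cs.zip ts).map Prod.fst)).length ≤ (PySem.Set.ofList cs).length :=
    dedup_zip_len_le cs ts
  split_ifs with h1 h2 <;> try rfl
  exact absurd h1 (by omega)

-- ===== VERDICT (by name: the statement is the Claim_ definition above) =====
theorem min_time_for_meal_spec : Claim_equal_min_time_for_meal := by
  intro tcs _
  unfold Spec_min_time_for_meal min_time_for_meal min_time_for_meal_alt
  rw [PySem.List.foldl_append_singleton_eq_map]
  simp only [List.nil_append]
  exact List.map_congr_left (fun case _ => pvcase_eq _ _ _)
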